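-- pv_equiv track=rewrite | github.com/corazza/kriptografija | src/afina.py | _n_most_frequent
-- ===== SOURCE A (Python) =====
-- def _n_most_frequent(n: int, length: int, in_z: list[int]) -> list[int]:
--     counter = {}
--     for i in range(len(in_z) - length + 1):
--         z = tuple(in_z[i:i+length])
--         if z not in counter:
--             counter[z] = 0
--         counter[z] += 1
--     grouped = {}
--     for key, val in counter.items():
--         if val not in grouped:
--             grouped[val] = []
--         grouped[val].append(key)
--
--     counter_list = sorted(list(grouped.items()), key=lambda x: -x[0])
--     return list(map(lambda x: x[1], counter_list[0:n]))
-- ===== SOURCE B (Python) =====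
-- def _n_most_frequent(n: int, length: int, in_z: list[int]) -> list[int]:
--     counter = {}
--     for i in range(len(in_z) - length + 1):
--         z = tuple(in_z[i:i+length])
--         counter[z] = counter.get(z, 0) + 1
--     items = sorted(counter.items(), key=lambda kv: -kv[1])
--
--     def groups(items):
--         if not items:
--             return []
--         cnt = items[0][1]
--         j = 0
--         while j < len(items) and items[j][1] == cnt:
--             j += 1
--         return [[kv[0] for kv in items[:j]]] + groups(items[j:])
--
--     return groups(items)[0:n]
-- ===== Notes on version B (the rewrite author's own statement) =====
-- stated objective: alternative
-- what changed: A buckets the window counts into a second dict keyed by count and then sorts the distinct counts; B stably sorts the counter's items once by descending count and splits the sorted list into consecutive equal-count runs (recursive run-grouping), relying on sort stability for the within-group order.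
import Mathlib
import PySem

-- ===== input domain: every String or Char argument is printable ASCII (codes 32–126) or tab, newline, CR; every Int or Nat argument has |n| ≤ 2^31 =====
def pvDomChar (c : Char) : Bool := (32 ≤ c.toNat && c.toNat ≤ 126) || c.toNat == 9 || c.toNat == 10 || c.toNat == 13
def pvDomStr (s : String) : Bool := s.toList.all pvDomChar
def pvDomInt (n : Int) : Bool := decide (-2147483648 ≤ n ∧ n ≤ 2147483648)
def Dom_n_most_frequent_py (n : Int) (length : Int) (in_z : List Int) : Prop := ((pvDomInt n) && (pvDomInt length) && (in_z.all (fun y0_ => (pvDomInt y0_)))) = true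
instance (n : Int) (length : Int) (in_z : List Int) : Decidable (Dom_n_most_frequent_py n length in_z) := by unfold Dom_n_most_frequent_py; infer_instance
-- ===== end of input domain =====

-- B replaces A's bucket-dict-keyed-by-count-then-sort with one stable sort of the counter's
-- items by descending count followed by consecutive run-grouping (objective: alternative).

-- ===== PORT A =====
def n_most_frequent_py (n : Int) (length : Int) (in_z : List Int) : List (List (List Int)) :=
  -- counter[z] += 1 on a key ensured present is ported as insert z (getD z 0 + 1)
  let counter : PySem.Dict (List Int) Int :=
    (PySem.List.pyRange 0 ((in_z.length : Int) - length + 1) 1).foldl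
      (fun d i =>
        let z := PySem.List.slice in_z (some i) (some (i + length))
        let d := if d.contains z then d else d.insert z 0
        d.insert z (d.getD z 0 + 1))
      PySem.Dict.empty
  let grouped : PySem.Dict Int (List (List Int)) :=
    counter.items.foldl
      (fun g kv =>
        let g := if g.contains kv.2 then g else g.insert kv.2 ([] : List (List Int))
        g.insert kv.2 (g.getD kv.2 [] ++ [kv.1]))
      PySem.Dict.empty
  let counter_list := PySem.List.sorted grouped.items (fun x => -x.1)
  PySem.List.slice (counter_list.map (fun x => x.2)) (some 0) (some n)

-- ===== PORT B =====
-- Source B's recursive groups(): the while loop counting the leading equal-count run makes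
-- items[:j] = takeWhile / items[j:] = dropWhile on the tail (the first element always passes).
def pvGroups : List (List Int × Int) → List (List (List Int))
  | [] => []
  | kv :: rest =>
      ((kv :: rest.takeWhile (fun q => q.2 == kv.2)).map (fun q => q.1)) ::
        pvGroups (rest.dropWhile (fun q => q.2 == kv.2))
termination_by l => l.length
decreasing_by
  exact Nat.lt_succ_of_le (List.length_dropWhile_le _ _)

def n_most_frequent_py_alt (n : Int) (length : Int) (in_z : List Int) : List (List (List Int)) :=
  let counter : PySem.Dict (List Int) Int :=
    (PySem.List.pyRange 0 ((in_z.length : Int) - length + 1) 1).foldl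
      (fun d i =>
        let z := PySem.List.slice in_z (some i) (some (i + length))
        d.insert z (d.getD z 0 + 1))
      PySem.Dict.empty
  let items := PySem.List.sorted counter.items (fun kv => -kv.2)
  PySem.List.slice (pvGroups items) (some 0) (some n)

-- ===== PRECONDITION & SPEC =====
def Spec_n_most_frequent_py (n : Int) (length : Int) (in_z : List Int) (out : List (List (List Int))) : Prop := out = n_most_frequent_py_alt n length in_z
instance (n : Int) (length : Int) (in_z : List Int) (out : List (List (List Int))) : Decidable (Spec_n_most_frequent_py n length in_z out) := by unfold Spec_n_most_frequent_py; infer_instance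

-- ===== CLAIM (what is proved, stated in full; the proofs are below) =====
def Claim_equal_n_most_frequent_py : Prop := ∀ (n : Int) (length : Int) (in_z : List Int), Dom_n_most_frequent_py n length in_z → Spec_n_most_frequent_py n length in_z (n_most_frequent_py n length in_z)

-- ===== LEMMAS AND PROOFS =====

theorem pvCounter_eq (length : Int) (in_z : List Int) :
    (PySem.List.pyRange 0 ((in_z.length : Int) - length + 1) 1).foldl
      (fun d i =>
        let z := PySem.List.slice in_z (some i) (some (i + length))
        let d := if d.contains z then d else d.insert z 0
        d.insert z (d.getD z 0 + 1))
      (PySem.Dict.empty : PySem.Dict (List Int) Int)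
    = (PySem.List.pyRange 0 ((in_z.length : Int) - length + 1) 1).foldl
      (fun d i =>
        let z := PySem.List.slice in_z (some i) (some (i + length))
        d.insert z (d.getD z 0 + 1))
      PySem.Dict.empty := by
  apply PySem.List.foldl_congr_mem
  intro d i _
  simp only
  by_cases h : d.contains (PySem.List.slice in_z (some i) (some (i + length))) = true
  · simp [h]
  · rw [if_neg h, PySem.Dict.getD_insert_self, PySem.Dict.insert_insert_self,
        PySem.Dict.getD_of_not_contains d _ (by simpa using h)]

theorem pvGrouped_eq_modify (l : List (List Int × Int)) :
    l.foldl
      (fun g kv =>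
        let g := if g.contains kv.2 then g else g.insert kv.2 ([] : List (List Int))
        g.insert kv.2 (g.getD kv.2 [] ++ [kv.1]))
      PySem.Dict.empty
    = l.foldl (fun g kv => g.modify kv.2 [] (· ++ [kv.1])) PySem.Dict.empty := by
  apply PySem.List.foldl_congr_mem
  intro g kv _
  simp only [PySem.Dict.modify]
  by_cases h : g.contains kv.2 = true
  · simp [h]
  · rw [if_neg h, PySem.Dict.getD_insert_self, PySem.Dict.insert_insert_self,
        PySem.Dict.getD_of_not_contains g _ (by simpa using h)]

theorem pvOfList_sublist {α : Type} [BEq α] (xs : List α) :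
    List.Sublist (PySem.Set.ofList xs) xs := by
  have key : ∀ (xs acc : List α),
      List.Sublist (xs.foldl PySem.Set.add acc) (acc ++ xs) := by
    intro xs
    induction xs with
    | nil => intro acc; simp
    | cons x t ih =>
      intro acc
      have h2 : List.Sublist (PySem.Set.add acc x) (acc ++ [x]) := by
        unfold PySem.Set.add
        split
        · exact List.sublist_append_left acc [x]
        · exact List.Sublist.refl _
      have h3 := (ih (PySem.Set.add acc x)).trans (h2.append_right t)
      simpa using h3
  simpa using key xs []

theorem pvFilter_insertBy {α : Type} (key : α → Int) (x : α) (c : Int) (ys : List α)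
    (hys : ys.Pairwise (fun a b => key a ≤ key b)) :
    (PySem.List.insertBy (fun a b => decide (key a < key b)) x ys).filter (fun y => key y == c)
      = ys.filter (fun y => key y == c) ++ (if key x == c then [x] else []) := by
  induction ys with
  | nil => simp [PySem.List.insertBy, List.filter]; split <;> simp_all
  | cons y t ih =>
    rw [List.pairwise_cons] at hys
    simp only [PySem.List.insertBy]
    by_cases hlt : key x < key y
    · simp only [hlt, decide_true]
      rw [if_pos trivial]
      by_cases hc : (key x == c) = true
      · have hnone : (y :: t).filter (fun z => key z == c) = [] := by
          rw [List.filter_eq_nil_iff]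
          intro z hz
          have hyz : key y ≤ key z := by
            rcases List.mem_cons.mp hz with h | h
            · exact le_of_eq (by rw [h])
            · exact hys.1 z h
          have hxc : key x = c := by simpa using hc
          simp only [beq_iff_eq]
          omega
        rw [List.filter_cons_of_pos (p := fun y => key y == c) hc, hnone]
        simp [hc]
      · rw [List.filter_cons_of_neg (p := fun y => key y == c) (by simpa using hc)]
        simp [hc]
    · simp only [hlt, decide_false]
      rw [if_neg (by simp)]
      rw [List.filter_cons, List.filter_cons, ih hys.2]
      split <;> simp

theorem pvSorted_filter {α : Type} (key : α → Int) (c : Int) (l : List α) :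
    (PySem.List.sorted l key).filter (fun y => key y == c) = l.filter (fun y => key y == c) := by
  induction l using List.reverseRecOn with
  | nil => simp [PySem.List.sorted]
  | append_singleton t x ih =>
    rw [PySem.List.sorted_eq_foldl_insertBy, List.foldl_append, List.foldl_cons, List.foldl_nil,
        ← PySem.List.sorted_eq_foldl_insertBy]
    rw [pvFilter_insertBy key x c _ (PySem.List.sorted_pairwise t key), ih]
    rw [List.filter_append]
    split <;> simp_all

-- dedup of a leading constant run followed by a c-free tail
theorem pvDedup_run (c : Int) (xs ys : List Int)
    (hxs : ∀ x ∈ xs, x = c) (hys : c ∉ ys) :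
    PySem.List.dedup (c :: xs ++ ys) = c :: PySem.List.dedup ys := by
  have habs : ∀ (zs acc : List Int), (∀ x ∈ zs, x ∈ acc) → zs.foldl PySem.Set.add acc = acc := by
    intro zs
    induction zs with
    | nil => intro acc _; rfl
    | cons z t ih =>
      intro acc h
      have : PySem.Set.add acc z = acc := by
        unfold PySem.Set.add
        rw [if_pos (by simpa using h z (by simp))]
      rw [List.foldl_cons, this]
      exact ih acc (fun x hx => h x (by simp [hx]))
  have hcons : ∀ (zs : List Int) (acc : List Int) (a : Int), a ∉ zs →
      zs.foldl PySem.Set.add (a :: acc) = a :: zs.foldl PySem.Set.add acc := by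
    intro zs
    induction zs with
    | nil => intro acc a _; rfl
    | cons z t ih =>
      intro acc a h
      have hza : (z == a) = false := by
        simp only [beq_eq_false_iff_ne]
        intro hz; exact h (by simp [hz])
      have hadd : PySem.Set.add (a :: acc) z = a :: PySem.Set.add acc z := by
        have hzne : z ≠ a := by simpa using hza
        by_cases hm : z ∈ acc
        · simp [PySem.Set.add, hm, hzne]
        · simp [PySem.Set.add, hm, hzne]
      rw [List.foldl_cons, hadd, ih _ a (fun hz => h (by simp [hz])), List.foldl_cons]
  rw [PySem.List.dedup_eq_ofList, PySem.List.dedup_eq_ofList]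
  show (c :: xs ++ ys).foldl PySem.Set.add [] = c :: ys.foldl PySem.Set.add []
  rw [List.cons_append, List.foldl_cons, List.foldl_append]
  have h1 : PySem.Set.add [] c = [c] := rfl
  rw [h1, habs xs [c] (fun x hx => by simp [hxs x hx])]
  exact hcons ys [] c hys

theorem pvGroups_sorted (s : List (List Int × Int))
    (hs : s.Pairwise (fun a b => -a.2 ≤ -b.2)) :
    pvGroups s = (PySem.List.dedup (s.map (fun q => q.2))).map
      (fun c => (s.filter (fun q => q.2 == c)).map (fun q => q.1)) := by
  induction s using pvGroups.induct with
  | case1 => simp [pvGroups]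
  | case2 kv rest ih =>
    rw [List.pairwise_cons] at hs
    set c := kv.2 with hc
    set t := rest.takeWhile (fun q => q.2 == c) with ht
    set d := rest.dropWhile (fun q => q.2 == c) with hd
    have hrest : t ++ d = rest := List.takeWhile_append_dropWhile
    have htc : ∀ q ∈ t, q.2 = c := by
      intro q hq
      rw [ht] at hq
      have hp : (q.2 == c) = true := List.mem_takeWhile_imp (p := fun q : List Int × Int => q.2 == c) hq
      exact beq_iff_eq.mp hp
    have hdmem : ∀ q ∈ d, q ∈ rest := by
      intro q hq
      rw [hd] at hq
      exact (List.dropWhile_sublist _).mem hq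
    have hdle : ∀ q ∈ d, q.2 ≤ c := by
      intro q hq
      have := hs.1 q (hdmem q hq)
      omega
    have hdp : d.Pairwise (fun a b => -a.2 ≤ -b.2) :=
      List.Pairwise.sublist (List.dropWhile_sublist _) hs.2
    have hdne : ∀ q ∈ d, q.2 ≠ c := by
      cases hde : d with
      | nil => intro q hq; simp at hq
      | cons h0 d' =>
        have hh0' : h0.2 ≠ c := by
          have h1 := List.head?_dropWhile_not (fun q => q.2 == c) rest
          rw [← hd, hde] at h1
          simpa using h1
        have hh0c : h0.2 < c := lt_of_le_of_ne (hdle h0 (by rw [hde]; simp)) hh0'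
        rw [hde, List.pairwise_cons] at hdp
        intro q hq
        rcases List.mem_cons.mp hq with h | h
        · rw [h]; exact hh0'
        · have := hdp.1 q h
          omega
    -- the filtered lists
    have hfil_c : (kv :: rest).filter (fun q => q.2 == c) = kv :: t := by
      rw [List.filter_cons_of_pos (by simp [hc]), ← hrest, List.filter_append]
      rw [List.filter_eq_self.mpr (fun q hq => by simp [htc q hq]),
          List.filter_eq_nil_iff.mpr (fun q hq => by simp [hdne q hq])]
      simp
    have hfil_ne : ∀ c', c' ≠ c → (kv :: rest).filter (fun q => q.2 == c') = d.filter (fun q => q.2 == c') := by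
      intro c' hcc
      rw [List.filter_cons_of_neg (by simp; omega), ← hrest, List.filter_append]
      rw [List.filter_eq_nil_iff.mpr (fun q hq => by simp [htc q hq]; omega)]
      simp
    -- dedup of the key list
    have hdd : PySem.List.dedup ((kv :: rest).map (fun q => q.2))
        = c :: PySem.List.dedup (d.map (fun q => q.2)) := by
      have : (kv :: rest).map (fun q => q.2) = c :: (t.map (fun q => q.2) ++ d.map (fun q => q.2)) := by
        rw [← hrest]; simp [hc]
      rw [this]
      apply pvDedup_run
      · intro x hx
        rcases List.mem_map.mp hx with ⟨q, hq, hqe⟩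
        rw [← hqe]; exact htc q hq
      · intro hcmem
        rcases List.mem_map.mp hcmem with ⟨q, hq, hqe⟩
        exact hdne q hq hqe
    rw [pvGroups, ← hc, ← ht, ← hd, hdd]
    simp only [List.map_cons]
    rw [hfil_c, ih hdp]
    have htail : List.map (fun c' => List.map (fun q => q.1) (List.filter (fun q => q.2 == c') d))
          (PySem.List.dedup (List.map (fun q => q.2) d))
        = List.map (fun c' => List.map (fun q => q.1) (List.filter (fun q => q.2 == c') (kv :: rest)))
          (PySem.List.dedup (List.map (fun q => q.2) d)) := by
      apply List.map_congr_left
      intro c' hc'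
      have hcc : c' ≠ c := by
        have hm : c' ∈ List.map (fun q => q.2) d := by
          have := PySem.List.mem_dedup (List.map (fun q => q.2) d) c'
          simp only [PySem.List.dedup_eq_ofList] at this ⊢
          exact (PySem.Set.mem_ofList _ _).mp hc'
        rcases List.mem_map.mp hm with ⟨q, hq, hqe⟩
        exact fun h => hdne q hq (hqe.trans h)
      rw [hfil_ne c' hcc]
    rw [htail]
    simp

-- A's grouped dict in closed form
theorem pvGroupedItems (l : List (List Int × Int)) :
    (l.foldl (fun g kv => g.modify kv.2 [] (· ++ [kv.1])) (PySem.Dict.empty : PySem.Dict Int (List (List Int)))).items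
      = (PySem.List.dedup (l.map (fun q => q.2))).map
          (fun c => (c, (l.filter (fun q => q.2 == c)).map (fun q => q.1))) := by
  have hkeys : (l.foldl (fun g kv => g.modify kv.2 [] (· ++ [kv.1])) (PySem.Dict.empty : PySem.Dict Int (List (List Int)))).keys
      = PySem.List.dedup (l.map (fun q => q.2)) := by
    rw [PySem.Dict.keys_foldl_modify_key l (fun kv => kv.2) [] (fun _ kv v => v ++ [kv.1]) PySem.Dict.empty]
    rw [PySem.List.dedup_eq_ofList]
    rfl
  have hnd : (l.foldl (fun g kv => g.modify kv.2 [] (· ++ [kv.1])) (PySem.Dict.empty : PySem.Dict Int (List (List Int)))).keys.Nodup := by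
    apply PySem.Dict.nodup_keys_foldl_modify_key l (fun kv => kv.2) [] (fun _ kv v => v ++ [kv.1]) PySem.Dict.empty
    exact PySem.Dict.nodup_keys_empty
  rw [PySem.Dict.items_eq_map_keys _ hnd ([] : List (List Int)), hkeys]
  apply List.map_congr_left
  intro c _
  have hg : (l.foldl (fun g kv => g.modify kv.2 [] (· ++ [kv.1])) (PySem.Dict.empty : PySem.Dict Int (List (List Int)))).getD c []
      = (l.filter (fun q => q.2 == c)).map (fun q => q.1) := by
    have hh := PySem.Dict.getD_foldl_modify_append (l.map (fun kv => (kv.2, kv.1))) (PySem.Dict.empty : PySem.Dict Int (List (List Int))) c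
    rw [List.foldl_map] at hh
    simp only at hh
    rw [hh]
    simp [List.filter_map, Function.comp_def]
  rw [hg]

theorem pvStrictPairwise (s : List Int) (hle : s.Pairwise (fun a b => -a ≤ -b)) (hnd : s.Nodup) :
    s.Pairwise (fun a b => -a < -b) := by
  have := hle.and hnd
  exact this.imp (fun h => by omega)

theorem pvSideA' (l : List (List Int × Int)) :
    (PySem.List.sorted
      (l.foldl (fun g kv => g.modify kv.2 [] (· ++ [kv.1])) (PySem.Dict.empty : PySem.Dict Int (List (List Int)))).items
      (fun x => -x.1)).map (fun x => x.2)
    = (PySem.List.sorted (PySem.List.dedup (l.map (fun q => q.2))) (fun c => -c)).map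
        (fun c => (l.filter (fun q => q.2 == c)).map (fun q => q.1)) := by
  rw [pvGroupedItems]
  have hnd : (PySem.List.dedup (l.map (fun q => q.2))).Nodup := by
    rw [PySem.List.dedup_eq_ofList]; exact PySem.Set.nodup_ofList _
  have hsortnd : (PySem.List.sorted (PySem.List.dedup (l.map (fun q => q.2))) (fun c => -c)).Nodup :=
    (PySem.List.sorted_perm _ _ _).nodup_iff.mpr hnd
  have hstrict : (PySem.List.sorted (PySem.List.dedup (l.map (fun q => q.2))) (fun c => -c)).Pairwise
      (fun a b => -a < -b) :=
    pvStrictPairwise _ (PySem.List.sorted_pairwise _ _) hsortnd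
  have hmain : PySem.List.sorted
      ((PySem.List.dedup (l.map (fun q => q.2))).map
        (fun c => (c, (l.filter (fun q => q.2 == c)).map (fun q => q.1)))) (fun x => -x.1)
      = (PySem.List.sorted (PySem.List.dedup (l.map (fun q => q.2))) (fun c => -c)).map
        (fun c => (c, (l.filter (fun q => q.2 == c)).map (fun q => q.1))) := by
    apply PySem.List.sorted_eq_of_perm_of_pairwise_lt
    · exact (PySem.List.sorted_perm _ _ _).map _
    · rw [List.pairwise_map]
      exact hstrict.imp (fun h => h)
  rw [hmain, List.map_map]
  rfl

theorem pvKeyOrder (l : List (List Int × Int)) :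
    PySem.List.dedup ((PySem.List.sorted l (fun kv => -kv.2)).map (fun q => q.2))
      = PySem.List.sorted (PySem.List.dedup (l.map (fun q => q.2))) (fun c => -c) := by
  apply Eq.symm
  apply PySem.List.sorted_eq_of_perm_of_pairwise_lt
  · -- Perm
    have h1 : (PySem.List.dedup ((PySem.List.sorted l (fun kv => -kv.2)).map (fun q => q.2))).Nodup := by
      rw [PySem.List.dedup_eq_ofList]; exact PySem.Set.nodup_ofList _
    have h2 : (PySem.List.dedup (l.map (fun q => q.2))).Nodup := by
      rw [PySem.List.dedup_eq_ofList]; exact PySem.Set.nodup_ofList _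
    rw [List.perm_ext_iff_of_nodup h1 h2]
    intro a
    simp only [PySem.List.dedup_eq_ofList, PySem.Set.mem_ofList]
    constructor
    · intro h
      rcases List.mem_map.mp h with ⟨q, hq, hqe⟩
      exact List.mem_map.mpr ⟨q, (PySem.List.mem_sorted l _ _ q).mp hq, hqe⟩
    · intro h
      rcases List.mem_map.mp h with ⟨q, hq, hqe⟩
      exact List.mem_map.mpr ⟨q, (PySem.List.mem_sorted l _ _ q).mpr hq, hqe⟩
  · -- Pairwise strict
    apply pvStrictPairwise
    · have hmap : ((PySem.List.sorted l (fun kv => -kv.2)).map (fun q => q.2)).Pairwise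
          (fun a b => -a ≤ -b) := by
        rw [List.pairwise_map]
        exact (PySem.List.sorted_pairwise l (fun kv => -kv.2)).imp (fun h => h)
      have hsub : List.Sublist (PySem.List.dedup ((PySem.List.sorted l (fun kv => -kv.2)).map (fun q => q.2)))
          ((PySem.List.sorted l (fun kv => -kv.2)).map (fun q => q.2)) := by
        rw [PySem.List.dedup_eq_ofList]; exact pvOfList_sublist _
      exact hmap.sublist hsub
    · rw [PySem.List.dedup_eq_ofList]; exact PySem.Set.nodup_ofList _

theorem pvSideB (l : List (List Int × Int)) :
    pvGroups (PySem.List.sorted l (fun kv => -kv.2))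
    = (PySem.List.sorted (PySem.List.dedup (l.map (fun q => q.2))) (fun c => -c)).map
        (fun c => (l.filter (fun q => q.2 == c)).map (fun q => q.1)) := by
  rw [pvGroups_sorted _ (PySem.List.sorted_pairwise l (fun kv => -kv.2)), pvKeyOrder]
  apply List.map_congr_left
  intro c _
  have hpred : ∀ (m : List (List Int × Int)),
      m.filter (fun q => q.2 == c) = m.filter (fun q => (-q.2 : Int) == (-c : Int)) := by
    intro m
    apply List.filter_congr
    intro q _
    by_cases h : q.2 = c
    · simp [h]
    · have h2 : ¬ (-q.2 : Int) = -c := by omega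
      simp [h, h2]
  rw [hpred (PySem.List.sorted l (fun kv => -kv.2)), hpred l]
  congr 1
  exact pvSorted_filter (fun kv => -kv.2) (-c) l

-- ===== VERDICT (by name: the statement is the Claim_ definition above) =====
theorem n_most_frequent_py_spec : Claim_equal_n_most_frequent_py := by
  intro n length in_z _
  show n_most_frequent_py n length in_z = n_most_frequent_py_alt n length in_z
  unfold n_most_frequent_py n_most_frequent_py_alt
  dsimp only
  rw [pvCounter_eq, pvGrouped_eq_modify, pvSideA', pvSideB]
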